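-- pv_equiv track=rewrite | github.com/anupyadav27/threat-engine | pythonsdk-database/aws/generate_accessanalyzer_yaml.py | build_params_from_dependencies
-- ===== SOURCE A (Python) =====
-- from typing import Dict, List, Optional
--
-- def entity_to_field_name(entity: str) -> str:
--     """Convert entity name to field name for params."""
--     # accessanalyzer.analyzer_arn -> analyzerArn
--     parts = entity.split('.')[-1].split('_')
--     return parts[0] + ''.join(word.capitalize() for word in parts[1:])
--
-- def build_params_from_dependencies(dependencies: List[str], for_each_discovery_id: Optional[str],
--                                    required_params: List[str], service: str) -> Dict:
--     """Build params dict from dependencies."""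
--     params = {}
--
--     # Map entity patterns to common item field names
--     entity_to_item_field = {
--         "analyzer_arn": "arn",
--         "analyzer_name": "name",
--         "access_preview_id": "id",
--         "policy_generation_job_id": "jobId",
--         "archive_rule_rule_name": "ruleName",
--         "resource_resource_arn": "resource"
--     }
--
--     for dep_entity in dependencies:
--         entity_key = dep_entity.split('.')[-1]  # Get last part after service name
--
--         # Check if we have a direct mapping
--         if entity_key in entity_to_item_field:
--             field_name = entity_to_item_field[entity_key]
--         else:
--             # Convert entity to field name
--             field_name = entity_to_field_name(dep_entity)
--
--         # Check if this param is required
--         param_name = None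
--         for req_param in required_params:
--             if req_param.lower() == field_name.lower() or req_param.lower() == entity_key.lower().replace('_', ''):
--                 param_name = req_param
--                 break
--
--         if not param_name:
--             # Try to match by converting
--             param_name = field_name
--
--         if for_each_discovery_id:
--             # Use item reference
--             params[param_name] = f"{{{{ item.{field_name} }}}}"
--         else:
--             # Independent operation - shouldn't have params from dependencies
--             pass
--
--     return params
-- ===== SOURCE B (Python) =====
-- def entity_to_field_name(entity: str) -> str:
--     parts = entity.split('.')[-1].split('_')
--     return parts[0] + ''.join(word.capitalize() for word in parts[1:])
--
--
-- def build_params_from_dependencies(dependencies, for_each_discovery_id, required_params, service):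
--     """Build params dict from dependencies (indexed-lookup version)."""
--     if not for_each_discovery_id:
--         # Independent operation - no params come from dependencies
--         return {}
--
--     entity_to_item_field = {
--         "analyzer_arn": "arn",
--         "analyzer_name": "name",
--         "access_preview_id": "id",
--         "policy_generation_job_id": "jobId",
--         "archive_rule_rule_name": "ruleName",
--         "resource_resource_arn": "resource",
--     }
--
--     # One pass over required_params: first occurrence of each lowercased name,
--     # remembering its position so ties between the two candidate keys resolve
--     # to the earliest required param.
--     index = {}
--     for i, rp in enumerate(required_params):
--         index.setdefault(rp.lower(), (i, rp))
--
--     params = {}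
--     for dep_entity in dependencies:
--         entity_key = dep_entity.split('.')[-1]
--         if entity_key in entity_to_item_field:
--             field_name = entity_to_item_field[entity_key]
--         else:
--             field_name = entity_to_field_name(dep_entity)
--
--         c1 = index.get(field_name.lower())
--         c2 = index.get(entity_key.lower().replace('_', ''))
--         best = min((c for c in (c1, c2) if c is not None), default=None)
--         if best is not None and best[1]:
--             param_name = best[1]
--         else:
--             param_name = field_name
--         params[param_name] = f"{{{{ item.{field_name} }}}}"
--     return params
-- ===== Notes on version B (the rewrite author's own statement) =====
-- stated objective: faster
-- what changed: Replaces A's inner linear scan of required_params for every dependency by a dictionary built once (lowercased param -> (first index, original)); each dependency does two O(1) lookups and keeps the earlier hit, and the falsy for_each_discovery_id case returns {} up front instead of looping with a dead branch.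
import Mathlib
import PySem

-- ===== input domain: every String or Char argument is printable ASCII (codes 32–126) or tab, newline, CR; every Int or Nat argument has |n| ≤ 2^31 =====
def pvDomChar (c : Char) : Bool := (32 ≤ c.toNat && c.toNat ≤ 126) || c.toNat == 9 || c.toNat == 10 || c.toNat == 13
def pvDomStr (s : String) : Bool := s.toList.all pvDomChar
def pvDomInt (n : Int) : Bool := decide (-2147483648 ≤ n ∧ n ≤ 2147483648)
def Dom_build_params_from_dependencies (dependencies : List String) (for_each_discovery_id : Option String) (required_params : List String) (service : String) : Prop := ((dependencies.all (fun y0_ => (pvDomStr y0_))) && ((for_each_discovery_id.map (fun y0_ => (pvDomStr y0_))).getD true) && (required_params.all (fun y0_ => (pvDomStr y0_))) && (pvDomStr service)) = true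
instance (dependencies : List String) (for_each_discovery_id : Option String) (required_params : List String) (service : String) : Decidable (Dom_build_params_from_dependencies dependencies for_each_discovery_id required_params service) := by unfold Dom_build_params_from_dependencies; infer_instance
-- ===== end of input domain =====

-- B replaces A's inner scan of required_params per dependency by a hash index built once
-- (lowercased name -> (first position, original)), looking up the two candidate keys and
-- taking the earlier hit: O(D+R) instead of O(D*R). Objective: faster (asymptotic).

-- ===== PORT A =====
-- shared helper of both Python files: str.capitalize() on ASCII (first char upper, rest lower)
def pvCapWord (cs : List Char) : List Char :=
  match cs with
  | [] => []
  | c :: rest => PySem.Chars.upperChar c :: rest.map PySem.Chars.lowerChar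

-- shared module-level helper `entity_to_field_name` (identical in Source A and Source B)
def entity_to_field_name (entity : String) : String :=
  -- entity.split('.')[-1]: split with a non-empty separator is never empty, so [-1] is getLast
  let parts := PySem.Chars.splitOn ((PySem.Chars.splitOn entity.toList ['.']).getLastD []) ['_']
  match parts with
  | [] => ""  -- unreachable: splitOn always returns at least one piece
  | p0 :: rest => String.mk (p0 ++ PySem.Chars.join [] (rest.map pvCapWord))

-- the literal `entity_to_item_field` dict (identical in Source A and Source B)
def pvEntityToItemField : PySem.Dict String String :=
  PySem.Dict.ofList [("analyzer_arn", "arn"), ("analyzer_name", "name"),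
    ("access_preview_id", "id"), ("policy_generation_job_id", "jobId"),
    ("archive_rule_rule_name", "ruleName"), ("resource_resource_arn", "resource")]

def build_params_from_dependencies (dependencies : List String) (for_each_discovery_id : Option String) (required_params : List String) (service : String) : List (String × String) :=
  -- Python truthiness of the Optional[str]
  let feTruthy : Bool := match for_each_discovery_id with
    | some s => !(s == "")
    | none => false
  let params := dependencies.foldl (fun (params : PySem.Dict String String) dep_entity =>
    let entity_key := String.mk ((PySem.Chars.splitOn dep_entity.toList ['.']).getLastD [])
    let field_name := match pvEntityToItemField.get? entity_key with
      | some v => v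
      | none => entity_to_field_name dep_entity
    -- inner for-loop with break = find?
    let param_name? := required_params.find? (fun req_param =>
      PySem.Str.lower req_param == PySem.Str.lower field_name ||
      PySem.Str.lower req_param == PySem.Str.replace (PySem.Str.lower entity_key) "_" "")
    -- `if not param_name: param_name = field_name` (an empty matched string is falsy too)
    let param_name := match param_name? with
      | some p => if p == "" then field_name else p
      | none => field_name
    if feTruthy then params.insert param_name ("{{ item." ++ field_name ++ " }}") else params)
    PySem.Dict.empty
  params.items

-- ===== PORT B =====
-- min over the (up to two) present candidates; Python tuple order (index first, then string)
def pvBestOf (x y : Option (Nat × String)) : Option (Nat × String) :=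
  match x, y with
  | none, none => none
  | some a, none => some a
  | none, some b => some b
  | some a, some b => some (if b.1 < a.1 || (b.1 == a.1 && PySem.Chars.strLt b.2.toList a.2.toList) then b else a)

def build_params_from_dependencies_alt (dependencies : List String) (for_each_discovery_id : Option String) (required_params : List String) (service : String) : List (String × String) :=
  match for_each_discovery_id with
  | none => []
  | some fe =>
    if fe == "" then [] else
    -- one pass: index.setdefault(rp.lower(), (i, rp)) over enumerate(required_params)
    let idx := (required_params.foldl
      (fun (st : PySem.Dict String (Nat × String) × Nat) rp =>
        (st.1.setdefault (PySem.Str.lower rp) (st.2, rp), st.2 + 1))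
      (PySem.Dict.empty, 0)).1
    let params := dependencies.foldl (fun (params : PySem.Dict String String) dep_entity =>
      let entity_key := String.mk ((PySem.Chars.splitOn dep_entity.toList ['.']).getLastD [])
      let field_name := match pvEntityToItemField.get? entity_key with
        | some v => v
        | none => entity_to_field_name dep_entity
      let c1 := idx.get? (PySem.Str.lower field_name)
      let c2 := idx.get? (PySem.Str.replace (PySem.Str.lower entity_key) "_" "")
      let best := pvBestOf c1 c2
      let param_name := match best with
        | some b => if b.2 == "" then field_name else b.2
        | none => field_name
      params.insert param_name ("{{ item." ++ field_name ++ " }}"))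
      PySem.Dict.empty
    params.items

-- ===== PRECONDITION & SPEC =====
def Spec_build_params_from_dependencies (dependencies : List String) (for_each_discovery_id : Option String) (required_params : List String) (service : String) (out : List (String × String)) : Prop := out = build_params_from_dependencies_alt dependencies for_each_discovery_id required_params service
instance (dependencies : List String) (for_each_discovery_id : Option String) (required_params : List String) (service : String) (out : List (String × String)) : Decidable (Spec_build_params_from_dependencies dependencies for_each_discovery_id required_params service out) := by unfold Spec_build_params_from_dependencies; infer_instance

-- ===== CLAIM (what is proved, stated in full; the proofs are below) =====
def Claim_equal_build_params_from_dependencies : Prop := ∀ (dependencies : List String) (for_each_discovery_id : Option String) (required_params : List String) (service : String), Dom_build_params_from_dependencies dependencies for_each_discovery_id required_params service → Spec_build_params_from_dependencies dependencies for_each_discovery_id required_params service (build_params_from_dependencies dependencies for_each_discovery_id required_params service)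

-- ===== LEMMAS AND PROOFS =====
-- spec of B's index: the first element of rps (counting from i) whose lowercase is k
def pvFindFrom (rps : List String) (i : Nat) (k : String) : Option (Nat × String) :=
  match rps with
  | [] => none
  | r :: rs => if PySem.Str.lower r == k then some (i, r) else pvFindFrom rs (i + 1) k

theorem pvFindFrom_le {rps : List String} {i : Nat} {k : String} {p : Nat × String}
    (h : pvFindFrom rps i k = some p) : i ≤ p.1 := by
  induction rps generalizing i with
  | nil => simp [pvFindFrom] at h
  | cons r rs ih =>
    simp only [pvFindFrom] at h
    split at h
    · cases h; exact le_refl _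
    · exact Nat.le_of_succ_le (ih h)

theorem pvIdx_get (rps : List String) (d : PySem.Dict String (Nat × String)) (i : Nat) (k : String) :
    ((rps.foldl (fun (st : PySem.Dict String (Nat × String) × Nat) rp =>
        (st.1.setdefault (PySem.Str.lower rp) (st.2, rp), st.2 + 1)) (d, i)).1).get? k =
      match d.get? k with
      | some v => some v
      | none => pvFindFrom rps i k := by
  induction rps generalizing d i with
  | nil =>
    simp only [List.foldl_nil, pvFindFrom]
    cases d.get? k <;> rfl
  | cons r rs ih =>
    simp only [List.foldl_cons, pvFindFrom]
    rw [ih]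
    by_cases hk : PySem.Str.lower r = k
    · subst hk
      rw [PySem.Dict.get?_setdefault_self]
      cases hd : d.get? (PySem.Str.lower r) <;> simp [hd]
    · rw [PySem.Dict.get?_setdefault_of_ne _ _ (Ne.symm hk)]
      simp [beq_iff_eq, hk]

theorem pvBest_eq_find (rps : List String) (i : Nat) (k1 k2 : String) :
    (pvBestOf (pvFindFrom rps i k1) (pvFindFrom rps i k2)).map (·.2) =
      rps.find? (fun r => PySem.Str.lower r == k1 || PySem.Str.lower r == k2) := by
  induction rps generalizing i with
  | nil => simp [pvFindFrom, pvBestOf]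
  | cons r rs ih =>
    by_cases h1 : PySem.Str.lower r = k1
    · by_cases h2 : PySem.Str.lower r = k2
      · rw [List.find?_cons_of_pos (by simp [h1]),
          show pvFindFrom (r :: rs) i k1 = some (i, r) from by simp [pvFindFrom, h1],
          show pvFindFrom (r :: rs) i k2 = some (i, r) from by simp [pvFindFrom, h2]]
        simp [pvBestOf, PySem.Chars.strLt]
      · rw [List.find?_cons_of_pos (by simp [h1]),
          show pvFindFrom (r :: rs) i k1 = some (i, r) from by simp [pvFindFrom, h1],
          show pvFindFrom (r :: rs) i k2 = pvFindFrom rs (i + 1) k2 from by simp [pvFindFrom, h2]]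
        cases hc2 : pvFindFrom rs (i + 1) k2 with
        | none => simp [pvBestOf]
        | some b =>
          have hle : i + 1 ≤ b.1 := pvFindFrom_le hc2
          simp [pvBestOf]
          rw [if_neg (by rintro (h | ⟨h, -⟩) <;> omega)]
    · by_cases h2 : PySem.Str.lower r = k2
      · rw [List.find?_cons_of_pos (by simp [h2]),
          show pvFindFrom (r :: rs) i k1 = pvFindFrom rs (i + 1) k1 from by simp [pvFindFrom, h1],
          show pvFindFrom (r :: rs) i k2 = some (i, r) from by simp [pvFindFrom, h2]]
        cases hc1 : pvFindFrom rs (i + 1) k1 with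
        | none => simp [pvBestOf]
        | some a =>
          have hle : i + 1 ≤ a.1 := pvFindFrom_le hc1
          simp [pvBestOf, (by omega : i < a.1)]
      · rw [List.find?_cons_of_neg (by simp [h1, h2]),
          show pvFindFrom (r :: rs) i k1 = pvFindFrom rs (i + 1) k1 from by simp [pvFindFrom, h1],
          show pvFindFrom (r :: rs) i k2 = pvFindFrom rs (i + 1) k2 from by simp [pvFindFrom, h2]]
        exact ih (i + 1)

theorem pvParam_eq (rps : List String) (fn k1 k2 : String) :
    (match pvBestOf
        ((rps.foldl (fun (st : PySem.Dict String (Nat × String) × Nat) rp =>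
            (st.1.setdefault (PySem.Str.lower rp) (st.2, rp), st.2 + 1))
          (PySem.Dict.empty, 0)).1.get? k1)
        ((rps.foldl (fun (st : PySem.Dict String (Nat × String) × Nat) rp =>
            (st.1.setdefault (PySem.Str.lower rp) (st.2, rp), st.2 + 1))
          (PySem.Dict.empty, 0)).1.get? k2) with
      | some b => if b.2 == "" then fn else b.2
      | none => fn) =
    (match rps.find? (fun r => PySem.Str.lower r == k1 || PySem.Str.lower r == k2) with
      | some p => if p == "" then fn else p
      | none => fn) := by
  rw [pvIdx_get rps PySem.Dict.empty 0 k1, pvIdx_get rps PySem.Dict.empty 0 k2]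
  rw [show (PySem.Dict.empty : PySem.Dict String (Nat × String)).get? k1 = none from rfl,
      show (PySem.Dict.empty : PySem.Dict String (Nat × String)).get? k2 = none from rfl]
  rw [← pvBest_eq_find rps 0 k1 k2]
  cases pvBestOf (pvFindFrom rps 0 k1) (pvFindFrom rps 0 k2) with
  | none => rfl
  | some b => rfl

-- ===== VERDICT (by name: the statement is the Claim_ definition above) =====
theorem build_params_from_dependencies_spec : Claim_equal_build_params_from_dependencies := by
  intro dependencies for_each_discovery_id required_params service _
  unfold Spec_build_params_from_dependencies
  unfold build_params_from_dependencies build_params_from_dependencies_alt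
  cases for_each_discovery_id with
  | none =>
    simp
    rfl
  | some fe =>
    by_cases hfe : fe = ""
    · subst hfe
      simp
      rfl
    · have hb : (fe == "") = false := by simp [hfe]
      simp only [hb, Bool.not_false, if_true, if_false, Bool.false_eq_true]
      congr 1
      congr 1
      funext params dep_entity
      dsimp only
      rw [pvParam_eq]
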